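-- pv_equiv track=rewrite | github.com/remyroche/Ares | scripts/assess_data_quality.py | _assess_label_imbalance_severity
-- ===== SOURCE A (Python) =====
-- from typing import Dict, Any, List, Tuple
--
-- def _assess_label_imbalance_severity(issues: List[str]) -> str:
--     """Assess the severity of label imbalance issues."""
--     if any("CRITICAL" in issue for issue in issues):
--         return "CRITICAL"
--     elif any("SEVERE" in issue for issue in issues):
--         return "HIGH"
--     elif any("DOMINANT" in issue for issue in issues):
--         return "MODERATE"
--     elif any("HOLD_CLASS" in issue for issue in issues):
--         return "LOW"
--     else:
--         return "NONE"
-- ===== SOURCE B (Python) =====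
-- def _assess_label_imbalance_severity(issues):
--     """Single pass over issues building the set of markers present, then one priority lookup."""
--     markers = ("CRITICAL", "SEVERE", "DOMINANT", "HOLD_CLASS")
--     found = set()
--     for issue in issues:
--         for m in markers:
--             if m in issue:
--                 found.add(m)
--     if "CRITICAL" in found:
--         return "CRITICAL"
--     if "SEVERE" in found:
--         return "HIGH"
--     if "DOMINANT" in found:
--         return "MODERATE"
--     if "HOLD_CLASS" in found:
--         return "LOW"
--     return "NONE"
-- ===== Notes on version B (the rewrite author's own statement) =====
-- stated objective: alternative
-- what changed: Replaced four separate short-circuiting any() scans over issues with a single pass that records which markers occur in a presence set, followed by one priority-ordered lookup.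
import Mathlib
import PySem

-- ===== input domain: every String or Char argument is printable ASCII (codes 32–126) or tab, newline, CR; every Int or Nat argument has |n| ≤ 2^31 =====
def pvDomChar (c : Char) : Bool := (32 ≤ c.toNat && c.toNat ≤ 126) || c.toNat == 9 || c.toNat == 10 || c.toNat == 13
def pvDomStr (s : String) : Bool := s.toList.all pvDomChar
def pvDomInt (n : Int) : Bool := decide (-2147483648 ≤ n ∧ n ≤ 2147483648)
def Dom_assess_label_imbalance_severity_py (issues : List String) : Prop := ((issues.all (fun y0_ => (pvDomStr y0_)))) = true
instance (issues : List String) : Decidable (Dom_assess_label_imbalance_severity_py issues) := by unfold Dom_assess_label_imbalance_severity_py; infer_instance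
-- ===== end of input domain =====

-- B replaces four separate short-circuiting any() scans with one pass building a
-- presence set of markers, then a priority-ordered lookup; return value only, same cost.

-- ===== PORT A =====
def assess_label_imbalance_severity_py (issues : List String) : String :=
  if issues.any (fun issue => PySem.Str.isIn "CRITICAL" issue) then "CRITICAL"
  else if issues.any (fun issue => PySem.Str.isIn "SEVERE" issue) then "HIGH"
  else if issues.any (fun issue => PySem.Str.isIn "DOMINANT" issue) then "MODERATE"
  else if issues.any (fun issue => PySem.Str.isIn "HOLD_CLASS" issue) then "LOW"
  else "NONE"

-- ===== PORT B =====
def pvMarkers : List String := ["CRITICAL", "SEVERE", "DOMINANT", "HOLD_CLASS"]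

def pvCollect (issues : List String) : PySem.Set String :=
  issues.foldl
    (fun found issue =>
      pvMarkers.foldl (fun found m => if PySem.Str.isIn m issue then PySem.Set.add found m else found) found)
    PySem.Set.empty

def assess_label_imbalance_severity_py_alt (issues : List String) : String :=
  let found := pvCollect issues
  if PySem.Set.contains found "CRITICAL" then "CRITICAL"
  else if PySem.Set.contains found "SEVERE" then "HIGH"
  else if PySem.Set.contains found "DOMINANT" then "MODERATE"
  else if PySem.Set.contains found "HOLD_CLASS" then "LOW"
  else "NONE"

-- ===== PRECONDITION & SPEC =====
def Spec_assess_label_imbalance_severity_py (issues : List String) (out : String) : Prop := out = assess_label_imbalance_severity_py_alt issues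
instance (issues : List String) (out : String) : Decidable (Spec_assess_label_imbalance_severity_py issues out) := by unfold Spec_assess_label_imbalance_severity_py; infer_instance

-- ===== CLAIM (what is proved, stated in full; the proofs are below) =====
def Claim_equal_assess_label_imbalance_severity_py : Prop := ∀ (issues : List String), Dom_assess_label_imbalance_severity_py issues → Spec_assess_label_imbalance_severity_py issues (assess_label_imbalance_severity_py issues)

-- ===== LEMMAS AND PROOFS =====

-- one issue's inner fold: membership afterwards, for a marker m
theorem mem_inner (found : PySem.Set String) (issue m : String) (hm : m ∈ pvMarkers) :
    m ∈ pvMarkers.foldl (fun found m => if PySem.Str.isIn m issue then PySem.Set.add found m else found) found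
      ↔ m ∈ found ∨ PySem.Str.isIn m issue = true := by
  fin_cases hm <;>
    simp [pvMarkers, List.foldl] <;>
    split_ifs <;>
    simp_all [PySem.Set.mem_add]

theorem mem_collect (issues : List String) (m : String) (hm : m ∈ pvMarkers) :
    m ∈ pvCollect issues ↔ issues.any (fun issue => PySem.Str.isIn m issue) = true := by
  unfold pvCollect
  suffices h : ∀ (s : PySem.Set String),
      m ∈ issues.foldl
        (fun found issue =>
          pvMarkers.foldl (fun found m => if PySem.Str.isIn m issue then PySem.Set.add found m else found) found) s
        ↔ m ∈ s ∨ issues.any (fun issue => PySem.Str.isIn m issue) = true by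
    simpa [PySem.Set.empty] using h PySem.Set.empty
  induction issues with
  | nil => simp
  | cons i rest ih =>
    intro s
    simp only [List.foldl_cons, ih, mem_inner _ _ _ hm, List.any_cons]
    constructor
    · rintro ((h | h) | h) <;> simp_all
    · rintro (h | h)
      · exact Or.inl (Or.inl h)
      · rcases Bool.or_eq_true_iff.mp h with h | h
        · exact Or.inl (Or.inr h)
        · exact Or.inr h

-- ===== VERDICT (by name: the statement is the Claim_ definition above) =====
theorem assess_label_imbalance_severity_py_spec : Claim_equal_assess_label_imbalance_severity_py := by
  intro issues _
  unfold Spec_assess_label_imbalance_severity_py assess_label_imbalance_severity_py assess_label_imbalance_severity_py_alt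
  have hc := mem_collect issues "CRITICAL" (by simp [pvMarkers])
  have hs := mem_collect issues "SEVERE" (by simp [pvMarkers])
  have hd := mem_collect issues "DOMINANT" (by simp [pvMarkers])
  have hh := mem_collect issues "HOLD_CLASS" (by simp [pvMarkers])
  simp only [PySem.Set.contains_iff] at *
  by_cases h1 : issues.any (fun issue => PySem.Str.isIn "CRITICAL" issue) = true <;>
  by_cases h2 : issues.any (fun issue => PySem.Str.isIn "SEVERE" issue) = true <;>
  by_cases h3 : issues.any (fun issue => PySem.Str.isIn "DOMINANT" issue) = true <;>
  by_cases h4 : issues.any (fun issue => PySem.Str.isIn "HOLD_CLASS" issue) = true <;>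
  simp_all
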